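-- pv_equiv track=rewrite | github.com/Muzsy/VRS_nesting | worker/engine_adapter_input.py | _rotation_policy_to_allowed_degrees_v2
-- ===== SOURCE A (Python) =====
-- from typing import Any
--
-- class EngineAdapterInputError(RuntimeError):
--     pass
--
-- def _parse_nonnegative_int(raw: Any, *, field: str) -> int:
--     if isinstance(raw, bool):
--         raise EngineAdapterInputError(f"invalid {field}")
--     try:
--         value = int(raw)
--     except (TypeError, ValueError) as exc:
--         raise EngineAdapterInputError(f"invalid {field}") from exc
--     if value < 0:
--         raise EngineAdapterInputError(f"invalid {field}")
--     return value
--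
-- def _parse_positive_int(raw: Any, *, field: str) -> int:
--     value = _parse_nonnegative_int(raw, field=field)
--     if value <= 0:
--         raise EngineAdapterInputError(f"invalid {field}")
--     return value
--
-- def _rotation_policy_to_allowed_degrees_v2(solver_config: dict[str, Any]) -> list[int]:
--     allow_free = bool(solver_config.get("allow_free_rotation"))
--     if allow_free:
--         raise EngineAdapterInputError(
--             "unsupported rotation policy: allow_free_rotation=true is not mappable to nesting_engine_v2"
--         )
--
--     step = _parse_positive_int(solver_config.get("rotation_step_deg"), field="solver_config_jsonb.rotation_step_deg")
--     seen: set[int] = set()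
--     ordered: list[int] = []
--     angle = 0
--     for _ in range(360):
--         if angle in seen:
--             break
--         seen.add(angle)
--         ordered.append(angle)
--         angle = (angle + step) % 360
--
--     if not ordered:
--         raise EngineAdapterInputError("unsupported rotation policy: empty rotation set")
--     return ordered
-- ===== SOURCE B (Python) =====
-- import math
-- from typing import Any
--
-- class EngineAdapterInputError(RuntimeError):
--     pass
--
-- def _parse_nonnegative_int(raw: Any, *, field: str) -> int:
--     if isinstance(raw, bool):
--         raise EngineAdapterInputError(f"invalid {field}")
--     try:
--         value = int(raw)
--     except (TypeError, ValueError) as exc: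
--         raise EngineAdapterInputError(f"invalid {field}") from exc
--     if value < 0:
--         raise EngineAdapterInputError(f"invalid {field}")
--     return value
--
-- def _parse_positive_int(raw: Any, *, field: str) -> int:
--     value = _parse_nonnegative_int(raw, field=field)
--     if value <= 0:
--         raise EngineAdapterInputError(f"invalid {field}")
--     return value
--
-- def _rotation_policy_to_allowed_degrees_v2(solver_config: dict[str, Any]) -> list[int]:
--     if bool(solver_config.get("allow_free_rotation")):
--         raise EngineAdapterInputError(
--             "unsupported rotation policy: allow_free_rotation=true is not mappable to nesting_engine_v2"
--         )
--     step = _parse_positive_int(solver_config.get("rotation_step_deg"), field="solver_config_jsonb.rotation_step_deg")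
--     count = 360 // math.gcd(step, 360)
--     return [(i * step) % 360 for i in range(count)]
-- ===== Notes on version B (the rewrite author's own statement) =====
-- stated objective: simpler
-- what changed: A builds the rotation list with a seen-set and a repeat-detecting break inside a for-loop over range(360); B computes the cycle length in closed form as 360 // math.gcd(step, 360) and emits the multiples (i*step) % 360 directly, with no set and no repeat detection.
import Mathlib
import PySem

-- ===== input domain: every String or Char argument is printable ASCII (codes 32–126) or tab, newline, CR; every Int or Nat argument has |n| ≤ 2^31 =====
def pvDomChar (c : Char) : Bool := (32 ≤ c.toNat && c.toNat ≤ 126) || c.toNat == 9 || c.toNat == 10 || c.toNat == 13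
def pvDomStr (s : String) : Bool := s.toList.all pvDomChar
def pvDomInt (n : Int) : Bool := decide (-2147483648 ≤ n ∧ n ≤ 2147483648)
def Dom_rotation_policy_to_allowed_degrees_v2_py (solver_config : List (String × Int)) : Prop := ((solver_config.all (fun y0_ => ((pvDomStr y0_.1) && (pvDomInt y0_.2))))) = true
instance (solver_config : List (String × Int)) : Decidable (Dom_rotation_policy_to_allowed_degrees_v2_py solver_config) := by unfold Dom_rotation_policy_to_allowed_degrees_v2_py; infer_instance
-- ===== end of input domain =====

-- B replaces A's repeat-detecting loop (seen-set + break) by the closed-form cycle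
-- length 360 // gcd(step, 360) and direct multiples (i*step) % 360 — simpler, no set.

-- ===== PORT A =====
-- the 'for _ in range(360): if angle in seen: break; …' loop, step for step
def pvLoopA (fuel : Nat) (seen : PySem.Set Int) (ordered : List Int) (angle step : Int) : List Int :=
  match fuel with
  | 0 => ordered
  | Nat.succ n =>
    if PySem.Set.contains seen angle then ordered
    else pvLoopA n (PySem.Set.add seen angle) (ordered ++ [angle]) (PySem.Int.mod (angle + step) 360) step

def rotation_policy_to_allowed_degrees_v2_py (solver_config : List (String × Int)) : List Int :=
  let d := PySem.Dict.ofList solver_config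
  -- allow_free = bool(solver_config.get("allow_free_rotation")); raise path ([]) excluded by Pre_
  if PySem.Dict.getD d "allow_free_rotation" 0 ≠ 0 then []
  else
    match PySem.Dict.get? d "rotation_step_deg" with
    | none => []  -- _parse_positive_int raises on None; excluded by Pre_
    | some step =>
      if step ≤ 0 then []  -- _parse_positive_int / _parse_nonnegative_int raise; excluded by Pre_
      else
        let ordered := pvLoopA 360 PySem.Set.empty [] 0 step
        if ordered = [] then [] else ordered  -- 'if not ordered: raise' (never fires)

-- ===== PORT B =====
def rotation_policy_to_allowed_degrees_v2_py_alt (solver_config : List (String × Int)) : List Int :=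
  let d := PySem.Dict.ofList solver_config
  if PySem.Dict.getD d "allow_free_rotation" 0 ≠ 0 then []
  else
    match PySem.Dict.get? d "rotation_step_deg" with
    | none => []
    | some step =>
      if step ≤ 0 then []
      else
        let count := 360 / Int.gcd step 360   -- math.gcd(step, 360)
        (List.range count).map (fun i : Nat => PySem.Int.mod ((i : Int) * step) 360)

-- ===== PRECONDITION & SPEC =====
-- Pre_ excludes exactly the inputs on which A raises EngineAdapterInputError: a truthy
-- "allow_free_rotation" value, or a missing/non-positive "rotation_step_deg".
def Pre_rotation_policy_to_allowed_degrees_v2_py (solver_config : List (String × Int)) : Prop :=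
  PySem.Dict.getD (PySem.Dict.ofList solver_config) "allow_free_rotation" 0 = 0 ∧
  0 < PySem.Dict.getD (PySem.Dict.ofList solver_config) "rotation_step_deg" 0

instance (solver_config : List (String × Int)) : Decidable (Pre_rotation_policy_to_allowed_degrees_v2_py solver_config) := by unfold Pre_rotation_policy_to_allowed_degrees_v2_py; infer_instance

def pvWitness_rotation_policy_to_allowed_degrees_v2_py : (List (String × Int)) := ([("rotation_step_deg", 90)])

def Spec_rotation_policy_to_allowed_degrees_v2_py (solver_config : List (String × Int)) (out : List Int) : Prop := out = rotation_policy_to_allowed_degrees_v2_py_alt solver_config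
instance (solver_config : List (String × Int)) (out : List Int) : Decidable (Spec_rotation_policy_to_allowed_degrees_v2_py solver_config out) := by unfold Spec_rotation_policy_to_allowed_degrees_v2_py; infer_instance

-- ===== CLAIM (what is proved, stated in full; the proofs are below) =====
def Claim_equal_rotation_policy_to_allowed_degrees_v2_py : Prop := ∀ (solver_config : List (String × Int)), Dom_rotation_policy_to_allowed_degrees_v2_py solver_config → Pre_rotation_policy_to_allowed_degrees_v2_py solver_config → Spec_rotation_policy_to_allowed_degrees_v2_py solver_config (rotation_policy_to_allowed_degrees_v2_py solver_config)

-- ===== LEMMAS AND PROOFS =====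

-- the angle after i loop iterations, as a Nat computation (step = n > 0)
def pvAng (n i : Nat) : Int := ((i * n % 360 : Nat) : Int)

lemma pvAng_zero (n : Nat) : pvAng n 0 = 0 := by simp [pvAng]

lemma pvAng_cycle (n : Nat) (hn : 0 < n) : pvAng n (360 / Nat.gcd n 360) = 0 := by
  unfold pvAng
  have hg : Nat.gcd n 360 ∣ 360 := Nat.gcd_dvd_right n 360
  obtain ⟨t, ht⟩ : Nat.gcd n 360 ∣ n := Nat.gcd_dvd_left n 360
  have hgpos : 0 < Nat.gcd n 360 := Nat.gcd_pos_of_pos_left 360 hn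
  have hmul : 360 / Nat.gcd n 360 * Nat.gcd n 360 = 360 := Nat.div_mul_cancel hg
  have hcalc : 360 / Nat.gcd n 360 * n = 360 * t := by
    calc 360 / Nat.gcd n 360 * n = 360 / Nat.gcd n 360 * (Nat.gcd n 360 * t) := by rw [← ht]
    _ = 360 / Nat.gcd n 360 * Nat.gcd n 360 * t := by ring
    _ = 360 * t := by rw [hmul]
  rw [hcalc]
  simp [Nat.mul_mod_right]

lemma pvAng_inj (n : Nat) (hn : 0 < n) :
    ∀ i j, i < 360 / Nat.gcd n 360 → j < 360 / Nat.gcd n 360 → pvAng n i = pvAng n j → i = j := by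
  have hgpos : 0 < Nat.gcd n 360 := Nat.gcd_pos_of_pos_left 360 hn
  have hg : Nat.gcd n 360 ∣ 360 := Nat.gcd_dvd_right n 360
  have hmul : 360 / Nat.gcd n 360 * Nat.gcd n 360 = 360 := Nat.div_mul_cancel hg
  -- wlog via a helper on ordered pairs
  have key : ∀ i j, i ≤ j → j < 360 / Nat.gcd n 360 → pvAng n i = pvAng n j → i = j := by
    intro i j hij hj he
    unfold pvAng at he
    have he' : i * n % 360 = j * n % 360 := by exact_mod_cast he
    have hmod : 360 ∣ j * n - i * n := (Nat.modEq_iff_dvd' (Nat.mul_le_mul_right n hij)).mp he'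
    have hsub : j * n - i * n = (j - i) * n := by
      rw [Nat.sub_mul]
    rw [hsub] at hmod
    obtain ⟨t, ht⟩ : Nat.gcd n 360 ∣ n := Nat.gcd_dvd_left n 360
    -- 360 = c * g, n = g * t, so c * g ∣ (j-i) * g * t, i.e. c ∣ (j-i) * t
    have hco : Nat.Coprime (360 / Nat.gcd n 360) t := by
      have h := Nat.coprime_div_gcd_div_gcd (m := n) (n := 360) hgpos
      have ht' : n / Nat.gcd n 360 = t :=
        Nat.div_eq_of_eq_mul_left hgpos (ht.trans (Nat.mul_comm _ _))
      rw [ht'] at h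
      exact h.symm
    have hcdvd : 360 / Nat.gcd n 360 ∣ (j - i) * t := by
      have h1 : 360 / Nat.gcd n 360 * Nat.gcd n 360 ∣ (j - i) * (Nat.gcd n 360 * t) := by
        rw [hmul, ← ht]; exact hmod
      have h2 : (j - i) * (Nat.gcd n 360 * t) = (j - i) * t * Nat.gcd n 360 := by ring
      rw [h2] at h1
      exact (Nat.mul_dvd_mul_iff_right hgpos).mp h1
    have hcji : 360 / Nat.gcd n 360 ∣ j - i := (Nat.Coprime.dvd_of_dvd_mul_right hco) hcdvd
    have : j - i = 0 := by
      by_contra hne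
      have := Nat.le_of_dvd (Nat.pos_of_ne_zero hne) hcji
      omega
    omega
  intro i j hi hj he
  rcases Nat.le_total i j with h | h
  · exact key i j h hj he
  · exact (key j i h hi he.symm).symm

lemma pvAng_succ (n k : Nat) : PySem.Int.mod (pvAng n k + (n : Int)) 360 = pvAng n (k + 1) := by
  unfold pvAng
  rw [show ((k * n % 360 : Nat) : Int) + (n : Int) = ((k * n % 360 + n : Nat) : Int) by push_cast; ring]
  rw [show (360 : Int) = ((360 : Nat) : Int) from rfl]
  rw [PySem.Int.mod_natCast]
  congr 1
  have h2 : ∀ m w : Nat, (m % 360 + w) % 360 = (m + w) % 360 := by intro m w; omega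
  rw [h2]
  congr 1
  ring

-- loop invariant: after k iterations seen = ordered = the first k angles, angle = pvAng n k
lemma pvLoopA_inv (n : Nat) (hn : 0 < n) :
    ∀ m k, k ≤ 360 / Nat.gcd n 360 → 360 / Nat.gcd n 360 - k = m →
    pvLoopA (360 - k) ((List.range k).map (pvAng n)) ((List.range k).map (pvAng n)) (pvAng n k) (n : Int)
      = (List.range (360 / Nat.gcd n 360)).map (pvAng n) := by
  have hgpos : 0 < Nat.gcd n 360 := Nat.gcd_pos_of_pos_left 360 hn
  have hcle : 360 / Nat.gcd n 360 ≤ 360 := Nat.div_le_self 360 _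
  have hcpos : 0 < 360 / Nat.gcd n 360 := Nat.div_pos (Nat.le_of_dvd (by norm_num) (Nat.gcd_dvd_right n 360)) hgpos
  intro m
  induction m with
  | zero =>
    intro k hk hm
    have hkc : k = 360 / Nat.gcd n 360 := by omega
    subst hkc
    by_cases hfull : 360 - 360 / Nat.gcd n 360 = 0
    · rw [hfull]; rfl
    · obtain ⟨f, hf⟩ : ∃ f, 360 - 360 / Nat.gcd n 360 = f + 1 := ⟨360 - 360 / Nat.gcd n 360 - 1, by omega⟩
      rw [hf]
      unfold pvLoopA
      have hmem : pvAng n (360 / Nat.gcd n 360) ∈ (List.range (360 / Nat.gcd n 360)).map (pvAng n) := by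
        rw [pvAng_cycle n hn, ← pvAng_zero n]
        exact List.mem_map_of_mem (List.mem_range.mpr hcpos)
      have : PySem.Set.contains ((List.range (360 / Nat.gcd n 360)).map (pvAng n)) (pvAng n (360 / Nat.gcd n 360)) = true :=
        (PySem.Set.contains_iff _ _).mpr hmem
      simp only [this, if_true]
  | succ m ih =>
    intro k hk hm
    have hklt : k < 360 / Nat.gcd n 360 := by omega
    obtain ⟨f, hf⟩ : ∃ f, 360 - k = f + 1 := ⟨360 - k - 1, by omega⟩
    rw [hf]
    unfold pvLoopA
    have hnotmem : pvAng n k ∉ (List.range k).map (pvAng n) := by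
      intro hmem
      obtain ⟨j, hj, hje⟩ := List.mem_map.mp hmem
      have hjk : j < k := List.mem_range.mp hj
      have := pvAng_inj n hn j k (by omega) hklt hje
      omega
    have hcont : PySem.Set.contains ((List.range k).map (pvAng n)) (pvAng n k) = false := by
      by_contra h
      exact hnotmem ((PySem.Set.contains_iff _ _).mp (by revert h; cases PySem.Set.contains ((List.range k).map (pvAng n)) (pvAng n k) <;> simp))
    rw [hcont]
    simp only [Bool.false_eq_true, if_false]
    have hadd : PySem.Set.add ((List.range k).map (pvAng n)) (pvAng n k) = (List.range k).map (pvAng n) ++ [pvAng n k] := by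
      unfold PySem.Set.add
      rw [hcont]
      simp
    have hsnoc : (List.range k).map (pvAng n) ++ [pvAng n k] = (List.range (k + 1)).map (pvAng n) := by
      rw [List.range_succ]; simp
    rw [hadd, pvAng_succ n k, hsnoc]
    have hf' : f = 360 - (k + 1) := by omega
    rw [hf']
    exact ih (k + 1) (by omega) (by omega)

lemma pvLoopA_closed (n : Nat) (hn : 0 < n) :
    pvLoopA 360 PySem.Set.empty [] 0 (n : Int) = (List.range (360 / Nat.gcd n 360)).map (pvAng n) := by
  have := pvLoopA_inv n hn (360 / Nat.gcd n 360) 0 (Nat.zero_le _) rfl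
  simpa [pvAng_zero, PySem.Set.empty] using this

-- ===== VERDICT (by name: the statement is the Claim_ definition above) =====
theorem rotation_policy_to_allowed_degrees_v2_py_spec : Claim_equal_rotation_policy_to_allowed_degrees_v2_py := by
  intro cfg _hdom hpre
  obtain ⟨hfree, hstep⟩ := hpre
  unfold Spec_rotation_policy_to_allowed_degrees_v2_py
  unfold rotation_policy_to_allowed_degrees_v2_py rotation_policy_to_allowed_degrees_v2_py_alt
  simp only [hfree, ne_eq, not_true_eq_false, if_false]
  -- the step key must be present and positive
  rcases hget : PySem.Dict.get? (PySem.Dict.ofList cfg) "rotation_step_deg" with _ | step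
  · exact absurd hstep (by rw [PySem.Dict.getD_eq_get?_getD, hget]; simp)
  · rw [PySem.Dict.getD_eq_get?_getD, hget] at hstep
    simp only [Option.getD_some] at hstep
    simp only [if_neg (not_le.mpr hstep)]
    obtain ⟨n, hn⟩ : ∃ n : Nat, step = (n : Int) := ⟨step.toNat, (Int.toNat_of_nonneg (le_of_lt hstep)).symm⟩
    have hnpos : 0 < n := by omega
    subst hn
    rw [pvLoopA_closed n hnpos]
    have hcpos : 0 < 360 / Nat.gcd n 360 :=
      Nat.div_pos (Nat.le_of_dvd (by norm_num) (Nat.gcd_dvd_right n 360)) (Nat.gcd_pos_of_pos_left 360 hnpos)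
    have hne : (List.range (360 / Nat.gcd n 360)).map (pvAng n) ≠ [] := by
      intro h
      have hlen : ((List.range (360 / Nat.gcd n 360)).map (pvAng n)).length = 360 / Nat.gcd n 360 := by simp
      rw [h] at hlen
      simp at hlen
      omega
    rw [if_neg hne]
    have hgcd : Int.gcd (n : Int) 360 = Nat.gcd n 360 := by
      simp [Int.gcd]
    rw [hgcd]
    apply List.map_congr_left
    intro i _
    unfold pvAng
    rw [show ((i : Int) * (n : Int)) = ((i * n : Nat) : Int) by push_cast; ring,
        show (360 : Int) = ((360 : Nat) : Int) from rfl, PySem.Int.mod_natCast]
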